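-- pv_equiv track=rewrite | github.com/kreggscode/Telegram-Crypto-bot | src/telegram_client.py | ensure_markdown_closed
-- ===== SOURCE A (Python) =====
-- def ensure_markdown_closed(text: str) -> str:
--     """
--     Robustly ensure all Telegram Markdown (V1) tags are properly closed.
--     V1 uses: *bold*, _italic_, `inline code`, ```pre/code blocks```, [text](url)
--     """
--     if text.count('```') % 2 != 0:
--         text += '\n```'
--
--     parts = text.split('```')
--     for i in range(0, len(parts), 2):
--         chunk = parts[i]
--         if chunk.count('`') % 2 != 0:
--             chunk += '`'
--         subparts = chunk.split('`')
--         for j in range(0, len(subparts), 2):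
--             subchunk = subparts[j]
--             if subchunk.count('*') % 2 != 0:
--                 subchunk += '*'
--             if subchunk.count('_') % 2 != 0:
--                 subchunk += '_'
--             open_brackets = subchunk.count('[')
--             closed_brackets = subchunk.count(']')
--             if open_brackets > closed_brackets:
--                 subchunk += ']' * (open_brackets - closed_brackets)
--             subparts[j] = subchunk
--         parts[i] = '`'.join(subparts)
--     return '```'.join(parts)
-- ===== SOURCE B (Python) =====
-- def ensure_markdown_closed(text: str) -> str:
--     return _close(text, [('```', '\n```'), ('`', '`')])
--
--
-- def _close(text, levels):
--     if not levels:
--         return _close_inline(text)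
--     (delim, closer), rest = levels[0], levels[1:]
--     if text.count(delim) % 2 != 0:
--         text += closer
--     parts = text.split(delim)
--     return delim.join(_close(p, rest) if i % 2 == 0 else p
--                       for i, p in enumerate(parts))
--
--
-- def _close_inline(chunk):
--     if chunk.count('*') % 2 != 0:
--         chunk += '*'
--     if chunk.count('_') % 2 != 0:
--         chunk += '_'
--     diff = chunk.count('[') - chunk.count(']')
--     if diff > 0:
--         chunk += ']' * diff
--     return chunk
-- ===== Notes on version B (the rewrite author's own statement) =====
-- stated objective: simpler
-- what changed: Replaces A's two hand-unrolled split/fix/rejoin loops (``` level, then ` level) by one recursive helper parameterised by a list of (delimiter, closer) levels, with a single inline base case that closes *, _ and unbalanced [.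
import Mathlib
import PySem

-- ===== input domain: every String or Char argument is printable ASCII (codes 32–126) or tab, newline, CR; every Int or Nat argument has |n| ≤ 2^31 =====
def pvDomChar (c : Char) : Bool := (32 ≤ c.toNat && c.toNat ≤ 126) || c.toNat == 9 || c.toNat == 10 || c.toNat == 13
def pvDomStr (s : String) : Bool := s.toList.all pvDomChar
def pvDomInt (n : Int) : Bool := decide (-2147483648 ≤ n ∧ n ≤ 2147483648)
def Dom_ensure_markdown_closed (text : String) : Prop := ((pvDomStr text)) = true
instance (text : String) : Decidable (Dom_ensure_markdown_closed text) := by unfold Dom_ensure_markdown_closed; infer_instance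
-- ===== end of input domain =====

-- B replaces A's two hand-unrolled split/fix/rejoin loops by one recursive helper over a
-- list of (delimiter, closer) levels with an inline base case (objective: simpler).
-- Strings are handled on the List Char side (PySem.Chars), bridged by String.toList/String.ofList.

-- ===== PORT A =====
-- the body of A's inner `for j` iteration on the subchunk it reads
def aFix (sc : List Char) : List Char :=
  let sc := if PySem.Chars.count sc ['*'] % 2 ≠ 0 then sc ++ ['*'] else sc
  let sc := if PySem.Chars.count sc ['_'] % 2 ≠ 0 then sc ++ ['_'] else sc
  let ob := PySem.Chars.count sc ['[']
  let cb := PySem.Chars.count sc [']']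
  if ob > cb then sc ++ List.replicate (ob - cb) ']' else sc

-- inner loop body: `subchunk = subparts[j]; …; subparts[j] = subchunk` (j from range(0, len, 2), so 0 ≤ j and j.toNat is exact)
def aStep2 (sp : List (List Char)) (j : Int) : List (List Char) :=
  sp.set j.toNat (aFix (PySem.List.pyGetD sp j []))

-- what A does to one chunk parts[i]: fix '`' balance, split, run the inner loop, rejoin
def aFixChunk (chunk : List Char) : List Char :=
  let chunk := if PySem.Chars.count chunk ['`'] % 2 ≠ 0 then chunk ++ ['`'] else chunk
  let subparts := PySem.Chars.splitOn chunk ['`']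
  let subparts := (PySem.List.pyRange 0 subparts.length 2).foldl aStep2 subparts
  PySem.Chars.join ['`'] subparts

-- outer loop body: `chunk = parts[i]; …; parts[i] = '`'.join(subparts)` (i from range(0, len, 2))
def aStep1 (ps : List (List Char)) (i : Int) : List (List Char) :=
  ps.set i.toNat (aFixChunk (PySem.List.pyGetD ps i []))

def ensure_markdown_closed (text : String) : String :=
  let t := text.toList
  let t := if PySem.Chars.count t ['`','`','`'] % 2 ≠ 0 then t ++ ['\n','`','`','`'] else t
  let parts := PySem.Chars.splitOn t ['`','`','`']
  let parts := (PySem.List.pyRange 0 parts.length 2).foldl aStep1 parts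
  String.ofList (PySem.Chars.join ['`','`','`'] parts)

-- ===== PORT B =====
-- base case: close *, _, and unbalanced [ in a single inline chunk
def bInline (c : List Char) : List Char :=
  let c := if PySem.Chars.count c ['*'] % 2 ≠ 0 then c ++ ['*'] else c
  let c := if PySem.Chars.count c ['_'] % 2 ≠ 0 then c ++ ['_'] else c
  let diff : Int := (PySem.Chars.count c ['['] : Int) - (PySem.Chars.count c [']'] : Int)
  if diff > 0 then c ++ List.replicate diff.toNat ']' else c

-- recursive helper over the fence levels
def bClose (t : List Char) (levels : List (List Char × List Char)) : List Char :=
  match levels with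
  | [] => bInline t
  | (delim, closer) :: rest =>
    let t := if PySem.Chars.count t delim % 2 ≠ 0 then t ++ closer else t
    let parts := PySem.Chars.splitOn t delim
    PySem.Chars.join delim
      ((PySem.List.enumerate parts).map (fun ip =>
        if PySem.Int.mod ip.1 2 == 0 then bClose ip.2 rest else ip.2))

def ensure_markdown_closed_alt (text : String) : String :=
  String.ofList (bClose text.toList [(['`','`','`'], ['\n','`','`','`']), (['`'], ['`'])])

-- ===== PRECONDITION & SPEC =====
def Spec_ensure_markdown_closed (text : String) (out : String) : Prop := out = ensure_markdown_closed_alt text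
instance (text : String) (out : String) : Decidable (Spec_ensure_markdown_closed text out) := by unfold Spec_ensure_markdown_closed; infer_instance

-- ===== CLAIM (what is proved, stated in full; the proofs are below) =====
def Claim_equal_ensure_markdown_closed : Prop := ∀ (text : String), Dom_ensure_markdown_closed text → Spec_ensure_markdown_closed text (ensure_markdown_closed text)

-- ===== LEMMAS AND PROOFS =====

-- the common even-index map both versions compute
def evenMap (f : List Char → List Char) : List (List Char) → List (List Char)
  | [] => []
  | [x] => [f x]
  | x :: y :: rest => f x :: y :: evenMap f rest

theorem pyRange_two_cons (a b : Int) (h : a < b) :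
    PySem.List.pyRange a b 2 = a :: PySem.List.pyRange (a+2) b 2 := by
  rw [PySem.List.pyRange_of_pos _ _ (by norm_num), PySem.List.pyRange_of_pos _ _ (by norm_num)]
  have hn : (if a < b then ((b - a + 2 - 1) / 2).toNat else 0)
      = (if a + 2 < b then ((b - (a + 2) + 2 - 1) / 2).toNat else 0) + 1 := by
    split_ifs <;> omega
  rw [hn, List.range_succ_eq_map]
  simp [List.map_map, Function.comp_def]
  intro k _
  omega

theorem foldl_shift2 (step : List (List Char) → Int → List (List Char))
    (hstep : ∀ (x y : List Char) t (k : Int), 0 ≤ k → step (x::y::t) (k+2) = x :: y :: step t k)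
    (l : List Int) (hl : ∀ k ∈ l, 0 ≤ k) (x y : List Char) (t : List (List Char)) :
    l.foldl (fun s k => step s (k+2)) (x::y::t) = x :: y :: l.foldl step t := by
  induction l generalizing t with
  | nil => rfl
  | cons k l ih =>
    simp only [List.foldl_cons]
    rw [hstep _ _ _ _ (hl k (by simp)), ih (fun k hk => hl k (by simp [hk]))]

theorem pyRange_two_shift (b : Int) :
    PySem.List.pyRange 2 b 2 = (PySem.List.pyRange 0 (b-2) 2).map (fun k => k + 2) := by
  rw [PySem.List.pyRange_of_pos _ _ (by norm_num), PySem.List.pyRange_of_pos _ _ (by norm_num)]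
  have hn : (if (2:Int) < b then ((b - 2 + 2 - 1) / 2).toNat else 0)
      = (if (0:Int) < b - 2 then ((b - 2 - 0 + 2 - 1) / 2).toNat else 0) := by
    split_ifs <;> omega
  rw [hn, List.map_map]
  apply List.map_congr_left; intro k _; simp [Function.comp]; ring

-- A's even-index set/get fold computes evenMap, for any loop body of the shape `sp[j] = f(sp[j])`
theorem foldl_even_set (f : List Char → List Char)
    (step : List (List Char) → Int → List (List Char))
    (hdef : ∀ sp j, step sp j = sp.set j.toNat (f (PySem.List.pyGetD sp j []))) :
    ∀ ps : List (List Char),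
      (PySem.List.pyRange 0 ps.length 2).foldl step ps = evenMap f ps := by
  intro ps
  induction ps using evenMap.induct with
  | case1 =>
    rw [PySem.List.pyRange_of_pos _ _ (by norm_num)]
    simp [evenMap]
  | case2 x =>
    rw [pyRange_two_cons _ _ (by norm_num), PySem.List.pyRange_of_pos _ _ (by norm_num)]
    simp only [List.length_cons, List.length_nil]
    norm_num
    rw [hdef, PySem.List.pyGetD_of_nonneg _ _ le_rfl]
    simp [evenMap]
  | case3 x y rest ih =>
    have hlen : ((x :: y :: rest).length : Int) = (rest.length : Int) + 2 := by simp; omega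
    rw [hlen, pyRange_two_cons _ _ (by omega)]
    simp only [List.foldl_cons]
    have h0 : step (x :: y :: rest) 0 = f x :: y :: rest := by
      rw [hdef, PySem.List.pyGetD_of_nonneg _ _ le_rfl]; rfl
    rw [h0]
    have hsh : (0:Int) + 2 = 2 := by norm_num
    rw [hsh, pyRange_two_shift, List.foldl_map]
    have harg : (rest.length : Int) + 2 - 2 = (rest.length : Int) := by ring
    rw [harg]
    rw [foldl_shift2 step ?hs _ ?hl]
    · rw [ih]; rfl
    case hs =>
      intro a c t k hk
      rw [hdef, hdef]
      have h1 : PySem.List.pyGetD (a::c::t) (k+2) ([]:List Char) = PySem.List.pyGetD t k [] := by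
        rw [PySem.List.pyGetD_of_nonneg _ _ (by omega), PySem.List.pyGetD_of_nonneg _ _ hk]
        have : (k+2).toNat = k.toNat + 2 := by omega
        simp [this]
      rw [h1]
      have : (k+2).toNat = k.toNat + 2 := by omega
      simp [this]
    case hl =>
      intro k hk
      rw [PySem.List.mem_pyRange_iff_of_pos (by norm_num)] at hk
      omega

-- B's enumerate/map computes evenMap too
theorem map_enumerate_even (f : List Char → List Char) :
    ∀ (ps : List (List Char)) (k : Int), 0 ≤ k → PySem.Int.mod k 2 = 0 →
      (PySem.List.enumerate ps k).map (fun ip =>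
        if PySem.Int.mod ip.1 2 == 0 then f ip.2 else ip.2) = evenMap f ps := by
  intro ps
  induction ps using evenMap.induct with
  | case1 => intro k _ _; simp [PySem.List.enumerate, evenMap]
  | case2 x =>
    intro k hk hm
    have hc : (PySem.Int.mod k 2 == 0) = true := by simp only [beq_iff_eq]; exact hm
    simp only [PySem.List.enumerate, List.map_cons, List.map_nil, evenMap, hc, if_true]
  | case3 x y rest ih =>
    intro k hk hm
    have hm1 : PySem.Int.mod (k+1) 2 ≠ 0 := by
      rw [PySem.Int.mod_eq_emod_of_pos (by norm_num)] at hm ⊢; omega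
    have hm2 : PySem.Int.mod (k+1+1) 2 = 0 := by
      rw [PySem.Int.mod_eq_emod_of_pos (by norm_num)] at hm ⊢; omega
    have hc : (PySem.Int.mod k 2 == 0) = true := by simp only [beq_iff_eq]; exact hm
    have hc1 : (PySem.Int.mod (k+1) 2 == 0) = false := by
      simp only [beq_eq_false_iff_ne, ne_eq]; exact hm1
    simp only [PySem.List.enumerate, List.map_cons, evenMap, hc, hc1, if_true]
    rw [ih (k+1+1) (by omega) hm2]
    simp

theorem evenMap_congr (f g : List Char → List Char) (h : ∀ c, f c = g c) :
    ∀ ps, evenMap f ps = evenMap g ps := by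
  intro ps
  induction ps using evenMap.induct with
  | case1 => rfl
  | case2 x => simp [evenMap, h]
  | case3 x y rest ih => simp [evenMap, h, ih]

-- the two inline chunk fixers agree (Nat- vs Int-side bracket count)
theorem inline_eq (sc : List Char) : aFix sc = bInline sc := by
  simp only [aFix, bInline]
  set c1 := if PySem.Chars.count sc ['*'] % 2 ≠ 0 then sc ++ ['*'] else sc with hc1
  set c2 := if PySem.Chars.count c1 ['_'] % 2 ≠ 0 then c1 ++ ['_'] else c1 with hc2
  by_cases h : PySem.Chars.count c2 ['['] > PySem.Chars.count c2 [']']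
  · rw [if_pos h, if_pos (by omega)]
    congr 2
    omega
  · rw [if_neg h, if_neg (by omega)]

-- A's per-chunk work equals B's level-1 recursion
theorem level1_eq (chunk : List Char) : aFixChunk chunk = bClose chunk [(['`'], ['`'])] := by
  simp only [aFixChunk, bClose]
  rw [foldl_even_set bInline aStep2 ?hdef]
  · rw [map_enumerate_even bInline _ 0 le_rfl (by decide)]
  case hdef =>
    intro sp j
    unfold aStep2
    rw [inline_eq]

-- one unfolding step of bClose on a cons level list
theorem bClose_cons (t d c : List Char) (rest : List (List Char × List Char)) :
    bClose t ((d, c) :: rest) =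
      PySem.Chars.join d
        ((PySem.List.enumerate (PySem.Chars.splitOn
            (if PySem.Chars.count t d % 2 ≠ 0 then t ++ c else t) d)).map (fun ip =>
          if PySem.Int.mod ip.1 2 == 0 then bClose ip.2 rest else ip.2)) := rfl

-- ===== VERDICT (by name: the statement is the Claim_ definition above) =====
theorem ensure_markdown_closed_spec : Claim_equal_ensure_markdown_closed := by
  intro text _
  unfold Spec_ensure_markdown_closed ensure_markdown_closed ensure_markdown_closed_alt
  dsimp only
  rw [bClose_cons]
  rw [foldl_even_set aFixChunk aStep1 (fun _ _ => rfl)]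
  rw [map_enumerate_even (fun c => bClose c [(['`'], ['`'])]) _ 0 le_rfl (by decide)]
  rw [evenMap_congr aFixChunk _ level1_eq]
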